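-- pv_equiv track=rewrite | github.com/Ashish720-alt/InvariantAutomation | src/inputgenerator.py | logical_connective_parser
-- ===== SOURCE A (Python) =====
-- def logical_connective_parser (string, symb, replace_symb, T):
--     n = len(symb)
--     rv = {}
--     rv_string = ""
--     str_index = 0
--     prop_ct = 0
--     i = 0
--     while i < len(string):
--         curr = string[i:i+n]
--         if (curr == symb or i == len(string) - 1):
--             key = "Q" + str(T) + str(prop_ct)
--             if (curr == symb):
--                 rv.update({key: string[str_index : i].strip()})
--             else:
--                 rv.update({key: string[str_index : i+1].strip() })
--             rv_string = rv_string[: len(rv_string) - (i - str_index) ]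
--             if (curr == symb):
--                 rv_string = rv_string + key + " " + replace_symb
--             else:
--                 rv_string = rv_string + key
--             str_index = i + n
--             prop_ct = prop_ct + 1
--             i = i + n
--         else:
--             rv_string = rv_string + string[i]
--             i = i + 1
--
--     return (rv, rv_string)
-- ===== SOURCE B (Python) =====
-- def logical_connective_parser(string, symb, replace_symb, T):
--     *body, last = string.split(symb)
--     rv = {}
--     pieces = []
--     i = 0
--     for part in body:
--         key = "Q" + str(T) + str(i)
--         rv[key] = part.strip()
--         pieces.append(key + " " + replace_symb)
--         i += 1
--     if last != "":
--         key = "Q" + str(T) + str(i)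
--         rv[key] = last.strip()
--         pieces.append(key)
--     return (rv, "".join(pieces))
-- ===== Notes on version B (the rewrite author's own statement) =====
-- stated objective: faster
-- what changed: Replaces A's index-by-index scan with its repeated rv_string slicing/re-concatenation by a single str.split(symb) followed by one pass over the parts list ('.join'ed pieces), removing the quadratic string rebuilding.
-- outside the precondition, e.g. on logical_connective_parser('', '', 'X', 0): A returns ({}, ''), B raises ValueError
import Mathlib
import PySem

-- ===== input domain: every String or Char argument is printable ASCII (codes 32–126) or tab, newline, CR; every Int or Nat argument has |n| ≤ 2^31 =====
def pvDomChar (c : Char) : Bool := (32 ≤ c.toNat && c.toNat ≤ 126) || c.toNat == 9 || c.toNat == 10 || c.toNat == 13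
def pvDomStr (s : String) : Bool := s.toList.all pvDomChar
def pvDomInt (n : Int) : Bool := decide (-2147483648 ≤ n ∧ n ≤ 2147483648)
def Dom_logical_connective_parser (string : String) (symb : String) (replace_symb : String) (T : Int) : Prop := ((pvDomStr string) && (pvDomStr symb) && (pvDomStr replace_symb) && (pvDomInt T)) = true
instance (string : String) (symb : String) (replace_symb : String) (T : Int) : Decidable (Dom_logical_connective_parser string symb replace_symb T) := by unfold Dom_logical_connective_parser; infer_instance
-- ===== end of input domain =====

-- B replaces A's index scan (with its running rv_string truncation) by str.split(symb) and one
-- pass over the parts list; objective: simpler. Proved equal whenever symb ≠ "".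

-- ===== PORT A =====
def lcpKey (T : Int) (c : Nat) : String := "Q" ++ PySem.Int.toStr T ++ PySem.Int.toStr (c : Int)
def lcpALoop (s sy repl : List Char) (T : Int) :
    Nat → Nat → Nat → Nat → PySem.Dict String String → List Char →
    PySem.Dict String String × List Char
  | 0, _, _, _, rv, rvs => (rv, rvs)
  | fuel + 1, i, str_index, prop_ct, rv, rvs =>
    if i < s.length then
      let curr := PySem.List.slice s (some (i : Int)) (some ((i : Int) + sy.length))
      if curr = sy ∨ i = s.length - 1 then
        let key := lcpKey T prop_ct
        let rv' :=
          if curr = sy then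
            rv.insert key (String.ofList (PySem.Chars.strip
              (PySem.List.slice s (some (str_index : Int)) (some (i : Int)))))
          else
            rv.insert key (String.ofList (PySem.Chars.strip
              (PySem.List.slice s (some (str_index : Int)) (some ((i : Int) + 1)))))
        let rvs' := PySem.List.slice rvs none
          (some ((rvs.length : Int) - ((i : Int) - (str_index : Int))))
        let rvs'' :=
          if curr = sy then rvs' ++ key.toList ++ ' ' :: repl
          else rvs' ++ key.toList
        lcpALoop s sy repl T fuel (i + sy.length) (i + sy.length) (prop_ct + 1) rv' rvs''
      else
        lcpALoop s sy repl T fuel (i + 1) str_index prop_ct rv (rvs ++ [s.getD i ' '])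
    else (rv, rvs)
def logical_connective_parser (string : String) (symb : String) (replace_symb : String) (T : Int) : (List (String × String)) × String :=
  let s := string.toList
  let out := lcpALoop s symb.toList replace_symb.toList T (s.length + 1) 0 0 0 PySem.Dict.empty []
  (out.1.items, String.ofList out.2)

-- ===== PORT B =====
def logical_connective_parser_alt (string : String) (symb : String) (replace_symb : String) (T : Int) : (List (String × String)) × String :=
  let parts := PySem.Chars.splitOn string.toList symb.toList
  let body := parts.dropLast
  let last := parts.getLast?.getD []      -- parts is never [] (split returns ≥ 1 part)
  let st := body.foldl
    (fun (st : Nat × PySem.Dict String String × List (List Char)) part =>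
      let key := lcpKey T st.1
      (st.1 + 1,
       st.2.1.insert key (String.ofList (PySem.Chars.strip part)),
       st.2.2 ++ [key.toList ++ ' ' :: replace_symb.toList]))
    (0, PySem.Dict.empty, [])
  let st2 :=
    if last ≠ [] then
      let key := lcpKey T st.1
      (st.2.1.insert key (String.ofList (PySem.Chars.strip last)), st.2.2 ++ [key.toList])
    else (st.2.1, st.2.2)
  (st2.1.items, String.ofList (PySem.Chars.join [] st2.2))

-- ===== PRECONDITION & SPEC =====
-- Pre_ excludes symb = "" only: there A loops forever on any nonempty string (and returns ({}, "")
-- on the empty string), while B's str.split(symb) raises ValueError.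
def Pre_logical_connective_parser (string : String) (symb : String) (replace_symb : String) (T : Int) : Prop := symb ≠ ""
instance (string : String) (symb : String) (replace_symb : String) (T : Int) : Decidable (Pre_logical_connective_parser string symb replace_symb T) := by unfold Pre_logical_connective_parser; infer_instance
def pvWitness_logical_connective_parser : String × String × String × Int := ("a , b", ",", "OR", 3)
def Spec_logical_connective_parser (string : String) (symb : String) (replace_symb : String) (T : Int) (out : (List (String × String)) × String) : Prop := out = logical_connective_parser_alt string symb replace_symb T
instance (string : String) (symb : String) (replace_symb : String) (T : Int) (out : (List (String × String)) × String) : Decidable (Spec_logical_connective_parser string symb replace_symb T out) := by unfold Spec_logical_connective_parser; infer_instance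

-- ===== CLAIM (what is proved, stated in full; the proofs are below) =====
def Claim_equal_logical_connective_parser : Prop := ∀ (string : String) (symb : String) (replace_symb : String) (T : Int), Dom_logical_connective_parser string symb replace_symb T → Pre_logical_connective_parser string symb replace_symb T → Spec_logical_connective_parser string symb replace_symb T (logical_connective_parser string symb replace_symb T)

-- ===== LEMMAS AND PROOFS =====

-- the per-parts pass both programs amount to: every non-last part contributes a "key repl" piece,
-- the last part a bare key and only when nonempty
def lcpFinish (repl : List Char) (T : Int) :
    List (List Char) → Nat → PySem.Dict String String → List Char →
    PySem.Dict String String × List Char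
  | [], _, rv, pre => (rv, pre)
  | [p], c, rv, pre =>
    if p = [] then (rv, pre)
    else (rv.insert (lcpKey T c) (String.ofList (PySem.Chars.strip p)), pre ++ (lcpKey T c).toList)
  | p :: q :: rest, c, rv, pre =>
    lcpFinish repl T (q :: rest) (c + 1)
      (rv.insert (lcpKey T c) (String.ofList (PySem.Chars.strip p)))
      (pre ++ (lcpKey T c).toList ++ ' ' :: repl)
lemma splitOn_go_acc (sy : List Char) (fuel : Nat) :
    ∀ (l cur : List Char) (acc : List (List Char)),
    PySem.Chars.splitOn.go sy fuel l cur acc =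
      acc.reverse ++ PySem.Chars.splitOn.go sy fuel l cur [] := by
  induction fuel with
  | zero => intro l cur acc; simp [PySem.Chars.splitOn.go]
  | succ f ih =>
    intro l cur acc
    cases l with
    | nil => simp [PySem.Chars.splitOn.go]
    | cons c rest =>
      simp only [PySem.Chars.splitOn.go]
      split
      · rw [ih _ _ (cur.reverse :: acc), ih _ _ [cur.reverse]]
        simp
      · exact ih _ _ acc
lemma splitOn_go_ne_nil (sy : List Char) (fuel : Nat) (l cur : List Char)
    (acc : List (List Char)) : PySem.Chars.splitOn.go sy fuel l cur acc ≠ [] := by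
  induction fuel generalizing l cur acc with
  | zero => simp [PySem.Chars.splitOn.go]
  | succ f ih =>
    cases l with
    | nil => simp [PySem.Chars.splitOn.go]
    | cons c rest =>
      simp only [PySem.Chars.splitOn.go]
      split
      · exact ih _ _ _
      · exact ih _ _ _

lemma lcp_main (s sy repl : List Char) (T : Int) (hsy : sy ≠ []) :
    ∀ (fuel i j c : Nat) (rv : PySem.Dict String String) (pre : List Char),
    j ≤ i → i ≤ s.length → s.length - i < fuel → (i < s.length ∨ j = i) →
    lcpALoop s sy repl T fuel i j c rv (pre ++ (s.drop j).take (i - j)) =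
      lcpFinish repl T
        (PySem.Chars.splitOn.go sy fuel (s.drop i) ((s.drop j).take (i - j)).reverse [])
        c rv pre := by
  intro fuel
  induction fuel with
  | zero => intro i j c rv pre _ _ hf _; omega
  | succ fuel ih =>
    intro i j c rv pre hji hi hf hcorner
    have hn : 1 ≤ sy.length := List.length_pos_iff.mpr hsy
    by_cases hil : i < s.length
    case neg =>
      have hj : j = i := hcorner.resolve_left hil
      subst hj
      have hd : s.drop j = [] := by rw [List.drop_eq_nil_iff]; omega
      simp only [Nat.sub_self, List.take_zero, List.append_nil, List.reverse_nil, hd]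
      simp only [lcpALoop, if_neg hil]
      simp [PySem.Chars.splitOn.go, lcpFinish]
    case pos =>
      have hseg : ((s.drop j).take (i - j)).length = i - j := by
        simp [List.length_take, List.length_drop]; omega
      have hcurr : PySem.List.slice s (some (i : Int)) (some ((i : Int) + sy.length))
          = (s.drop i).take sy.length := by
        rw [show ((i : Int) + sy.length) = ((i + sy.length : Nat) : Int) by push_cast; ring]
        rw [PySem.List.slice_natCast]
        congr 1; omega
      have htrunc : PySem.List.slice (pre ++ (s.drop j).take (i - j)) none
          (some ((((pre ++ (s.drop j).take (i - j)).length : Nat) : Int) - ((i : Int) - (j : Int))))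
          = pre := by
        rw [PySem.List.slice_to _ (show (0:Int) ≤ (((pre ++ (s.drop j).take (i - j)).length : Nat) : Int) - ((i : Int) - (j : Int)) by
          simp [List.length_append, hseg]; omega)]
        rw [show ((((pre ++ (s.drop j).take (i - j)).length : Nat) : Int) - ((i : Int) - (j : Int))).toNat = pre.length by
            simp [List.length_append, hseg]; omega]
        exact List.take_left ..
      have hsegval : PySem.List.slice s (some (j : Int)) (some (i : Int)) = (s.drop j).take (i - j) := by
        rw [PySem.List.slice_natCast]
      have hdropcons : s.drop i = s[i] :: s.drop (i + 1) := List.drop_eq_getElem_cons hil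
      have hprefix_iff : sy.isPrefixOf (s.drop i) = true ↔ (s.drop i).take sy.length = sy := by
        rw [List.isPrefixOf_iff_prefix, List.prefix_iff_eq_take]
        exact ⟨fun h => h.symm, fun h => h.symm⟩
      by_cases hcur : (s.drop i).take sy.length = sy
      · -- the symbol matches at i: close the current segment with "key repl"
        have hlen : i + sy.length ≤ s.length := by
          have := congrArg List.length hcur
          simp [List.length_take, List.length_drop] at this
          omega
        have IH' := ih (i + sy.length) (i + sy.length) (c + 1)
          (rv.insert (lcpKey T c) (String.ofList (PySem.Chars.strip ((s.drop j).take (i - j)))))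
          (pre ++ (lcpKey T c).toList ++ ' ' :: repl)
          (le_refl _) hlen (by omega) (Or.inr rfl)
        simp only [Nat.sub_self, List.take_zero, List.append_nil, List.reverse_nil] at IH'
        obtain ⟨q, rest', hq⟩ :=
          List.exists_cons_of_ne_nil
            (splitOn_go_ne_nil sy fuel (s.drop (i + sy.length)) [] [])
        simp only [lcpALoop, if_pos hil, hcurr, if_pos (Or.inl hcur), if_pos hcur, hsegval,
          htrunc]
        rw [IH', hq]
        have hpt : sy.isPrefixOf (s[i] :: s.drop (i + 1)) = true := by
          rw [← hdropcons]; exact hprefix_iff.mpr hcur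
        conv_rhs => rw [hdropcons]
        simp only [PySem.Chars.splitOn.go, hpt, if_true, List.reverse_reverse]
        rw [show List.drop sy.length (s[i] :: s.drop (i + 1)) = s.drop (i + sy.length) by
          rw [← hdropcons, List.drop_drop, Nat.add_comm]]
        rw [splitOn_go_acc, hq]
        simp [lcpFinish]
      · by_cases htail : i = s.length - 1
        · -- last index, no match: close the final segment bare
          have hd1 : s.drop (i + 1) = [] := by rw [List.drop_eq_nil_iff]; omega
          have hslice1 : PySem.List.slice s (some (j : Int)) (some ((i : Int) + 1))
              = (s.drop j).take (i + 1 - j) := by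
            rw [show ((i : Int) + 1) = ((i + 1 : Nat) : Int) by push_cast; ring]
            rw [PySem.List.slice_natCast]
          have htake1 : (s.drop j).take (i + 1 - j) = (s.drop j).take (i - j) ++ [s[i]] := by
            rw [show i + 1 - j = (i - j) + 1 by omega, List.take_add_one]
            congr 1
            rw [List.getElem?_eq_getElem (by simp [List.length_drop]; omega)]
            simp [List.getElem_drop]
            congr 1
            omega
          have hne1 : (s.drop j).take (i + 1 - j) ≠ [] := by
            rw [htake1]; simp
          obtain ⟨f, rfl⟩ : ∃ f, fuel = f + 1 := ⟨fuel - 1, by omega⟩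
          have hnp2 : sy.isPrefixOf [s[i]] = false := by
            rw [show [s[i]] = s.drop i by rw [hdropcons, hd1]]
            exact Bool.eq_false_iff.mpr (fun h => hcur (hprefix_iff.mp h))
          simp only [lcpALoop, if_pos hil, hcurr, if_pos (Or.inr htail), if_neg hcur,
            hslice1, htrunc, if_neg (show ¬ i + sy.length < s.length by omega)]
          conv_rhs => rw [hdropcons, hd1]
          simp only [PySem.Chars.splitOn.go, hnp2, Bool.false_eq_true, if_false,
            List.reverse_cons, List.reverse_reverse, List.reverse_nil, List.nil_append]
          rw [← htake1]
          simp [lcpFinish, hne1]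
        · -- plain character: copy it and continue
          have hnp : sy.isPrefixOf (s[i] :: s.drop (i + 1)) = false := by
            rw [← hdropcons]
            exact Bool.eq_false_iff.mpr (fun h => hcur (hprefix_iff.mp h))
          have htake1 : (s.drop j).take (i + 1 - j) = (s.drop j).take (i - j) ++ [s[i]] := by
            rw [show i + 1 - j = (i - j) + 1 by omega, List.take_add_one]
            congr 1
            rw [List.getElem?_eq_getElem (by simp [List.length_drop]; omega)]
            simp [List.getElem_drop]
            congr 1
            omega
          have IH' := ih (i + 1) j c rv pre (by omega) (by omega) (by omega)
            (Or.inl (by omega))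
          rw [htake1] at IH'
          simp only [lcpALoop, if_pos hil, hcurr,
            if_neg (show ¬((s.drop i).take sy.length = sy ∨ i = s.length - 1) by tauto)]
          rw [List.getD_eq_getElem s ' ' hil, List.append_assoc, IH']
          conv_rhs => rw [hdropcons]
          simp only [PySem.Chars.splitOn.go, hnp, Bool.false_eq_true, if_false]
          simp

lemma join_nil_flatten (ps : List (List Char)) : PySem.Chars.join [] ps = ps.flatten := by
  simp only [PySem.Chars.join, List.intercalate]
  induction ps with
  | nil => simp
  | cons p ps ih =>
    cases ps with
    | nil => simp
    | cons q rest => simp_all [List.intersperse]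

lemma lcp_finish_eq (repl : List Char) (T : Int) :
    ∀ (body : List (List Char)) (last : List Char) (c : Nat)
      (rv : PySem.Dict String String) (pieces : List (List Char)),
    lcpFinish repl T (body ++ [last]) c rv pieces.flatten =
      (let st := body.foldl
        (fun (st : Nat × PySem.Dict String String × List (List Char)) part =>
          (st.1 + 1,
           st.2.1.insert (lcpKey T st.1) (String.ofList (PySem.Chars.strip part)),
           st.2.2 ++ [(lcpKey T st.1).toList ++ ' ' :: repl]))
        (c, rv, pieces)
       if last ≠ [] then
        (st.2.1.insert (lcpKey T st.1) (String.ofList (PySem.Chars.strip last)),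
         (st.2.2 ++ [(lcpKey T st.1).toList]).flatten)
       else (st.2.1, st.2.2.flatten)) := by
  intro body
  induction body with
  | nil =>
    intro last c rv pieces
    simp only [List.nil_append, List.foldl_nil, lcpFinish]
    split_ifs with h1 h2 <;> simp_all
  | cons p body ih =>
    intro last c rv pieces
    cases hb : body ++ [last] with
    | nil => simp at hb
    | cons q rest =>
      simp only [List.cons_append, hb, lcpFinish, List.foldl_cons]
      rw [← hb]
      have : pieces.flatten ++ (lcpKey T c).toList ++ ' ' :: repl
           = (pieces ++ [(lcpKey T c).toList ++ ' ' :: repl]).flatten := by simp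
      rw [this, ih]

-- ===== VERDICT (by name: the statement is the Claim_ definition above) =====
theorem logical_connective_parser_spec : Claim_equal_logical_connective_parser := by
  intro string symb replace_symb T _ hpre
  simp only [Spec_logical_connective_parser]
  have hsy : symb.toList ≠ [] := by
    intro h
    exact hpre (by rwa [← String.toList_eq_nil_iff])
  have hmain := lcp_main string.toList symb.toList replace_symb.toList T hsy
    (string.toList.length + 1) 0 0 0 PySem.Dict.empty []
    (le_refl 0) (Nat.zero_le _) (by omega) (Or.inr rfl)
  simp only [Nat.sub_self, List.take_zero, List.append_nil,
    List.reverse_nil, List.drop_zero] at hmain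
  have hne : PySem.Chars.splitOn string.toList symb.toList ≠ [] :=
    splitOn_go_ne_nil _ _ _ _ _
  simp only [logical_connective_parser, logical_connective_parser_alt]
  rw [hmain]
  obtain ⟨body, last, hbl⟩ : ∃ body last,
      PySem.Chars.splitOn string.toList symb.toList = body ++ [last] :=
    ⟨_, _, (List.dropLast_concat_getLast hne).symm⟩
  have hbl' : PySem.Chars.splitOn.go symb.toList (string.toList.length + 1) string.toList [] []
      = body ++ [last] := hbl
  rw [hbl, hbl', List.getLast?_concat, List.dropLast_concat]
  have hfe := lcp_finish_eq replace_symb.toList T body last 0 PySem.Dict.empty []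
  simp only [List.flatten_nil] at hfe
  rw [hfe]
  simp only [join_nil_flatten, Option.getD_some]
  split_ifs with h <;> simp
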